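-- pv_equiv track=rewrite | github.com/chiralcentre/Kattis | talnalas.py | BFS
-- ===== SOURCE A (Python) =====
-- def BFS(n,m,adjList,numbers):
--     # time complexity of BFS = O(V + E) = O(m + 2nm)
--     # start from vertex m as source
--     frontier,visited,parent = [m],[False for _ in range(m + 2)],[-1 for _ in range(m + 2)]
--     visited[m] = True
--     while frontier:
--         new_frontier = []
--         for u in frontier:
--             for v in adjList[u]:
--                 if not visited[v]:
--                     visited[v] = True
--                     parent[v] = u
--                     new_frontier.append(v)
--                     if v == m + 1: # end state reached
--                         path,curr = [m + 1],m + 1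
--                         while parent[curr] != -1:
--                             curr = parent[curr]
--                             path.append(curr)
--                         return [numbers[path[i]] for i in range(len(path) - 1, -1, -1)]
--         frontier = new_frontier
--     return ["Neibb"]
-- ===== SOURCE B (Python) =====
-- def _rebuild(parent, numbers, curr):
--     # walk the parent chain from curr back to the root, emitting numbers forward
--     p = parent.get(curr, -1)
--     if p == -1:
--         return [numbers[curr]]
--     return _rebuild(parent, numbers, p) + [numbers[curr]]
--
-- def BFS(n, m, adjList, numbers):
--     # single-queue BFS from m; visited as a set, parents as a dict
--     queue, head = [m], 0
--     visited = {m}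
--     parent = {}
--     while head < len(queue):
--         u = queue[head]
--         head += 1
--         for v in adjList[u]:
--             if v not in visited:
--                 visited.add(v)
--                 parent[v] = u
--                 queue.append(v)
--                 if v == m + 1:
--                     return _rebuild(parent, numbers, m + 1)
--     return ["Neibb"]
-- ===== Notes on version B (the rewrite author's own statement) =====
-- stated objective: idiomatic
-- what changed: A's level-by-level BFS with two frontier lists and visited/parent arrays of size m+2 plus a build-then-reverse index-comprehension path print is replaced by the textbook single-FIFO-queue BFS over a visited set and a parent dict, with the answer rebuilt forward by recursion on the parent chain.
-- outside the precondition, e.g. on BFS(0, -1, {-1: [0]}, ['a']): A returns ['Neibb'], B returns ['a']; on BFS(0, 0, {0: [-1], -1: [1]}, ['a', 'b']): A returns ['Neibb'], B returns ['b']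
import Mathlib
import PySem

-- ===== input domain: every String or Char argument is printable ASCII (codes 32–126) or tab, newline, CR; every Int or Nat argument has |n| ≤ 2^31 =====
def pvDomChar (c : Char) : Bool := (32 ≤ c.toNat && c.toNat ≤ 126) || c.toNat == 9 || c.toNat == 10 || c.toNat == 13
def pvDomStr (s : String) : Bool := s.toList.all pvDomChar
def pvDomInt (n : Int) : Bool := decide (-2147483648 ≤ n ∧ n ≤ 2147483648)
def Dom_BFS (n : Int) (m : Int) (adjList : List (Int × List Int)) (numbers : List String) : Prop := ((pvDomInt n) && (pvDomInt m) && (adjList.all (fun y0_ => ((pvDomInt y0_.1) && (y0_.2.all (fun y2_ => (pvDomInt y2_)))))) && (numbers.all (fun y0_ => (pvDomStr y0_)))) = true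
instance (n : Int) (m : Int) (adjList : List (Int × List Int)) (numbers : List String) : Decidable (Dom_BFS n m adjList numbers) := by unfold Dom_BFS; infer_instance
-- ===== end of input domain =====

-- B replaces A's level-by-level two-list frontier BFS over visited/parent ARRAYS by the idiomatic
-- single-FIFO-queue BFS over a visited SET and a parent DICT, rebuilding the answer forward by
-- recursion on the parent chain instead of A's build-then-reverse index comprehension.

-- ===== PORT A =====
-- parent-chain walk of A ('while parent[curr] != -1'); the Nat fuel is a termination artifact only
-- (one unit per step; (m+2).toNat steps are more than any BFS parent chain can have)
def BFSwalkA (parent : List Int) : Nat → Int → List Int → List Int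
  | 0, _, path => path
  | f+1, curr, path =>
    let p := PySem.List.pyGetD parent curr (-1)
    if p ≠ -1 then BFSwalkA parent f p (path ++ [p]) else path

-- 'path,curr = [m+1],m+1; while …; return [numbers[path[i]] for i in range(len(path)-1,-1,-1)]'
def BFSreconA (m : Int) (parent : List Int) (numbers : List String) : List String :=
  let path := BFSwalkA parent (m+2).toNat (m+1) [m+1]
  (PySem.List.pyRange ((path.length : Int) - 1) (-1) (-1)).map
    (fun i => PySem.List.pyGetD numbers (PySem.List.pyGetD path i 0) "")

-- 'for v in adjList[u]: …' with the early 'return' modelled as .error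
def BFSinnerA (m u : Int) (numbers : List String) :
    List Int → List Bool → List Int → List Int →
    Except (List String) (List Bool × List Int × List Int)
  | [], visited, parent, nf => .ok (visited, parent, nf)
  | v :: vs, visited, parent, nf =>
    if PySem.List.pyGetD visited v false = false then
      let visited := PySem.List.pySetD visited v true
      let parent := PySem.List.pySetD parent v u
      let nf := nf ++ [v]
      if v = m + 1 then .error (BFSreconA m parent numbers)
      else BFSinnerA m u numbers vs visited parent nf
    else BFSinnerA m u numbers vs visited parent nf

-- 'while frontier: new_frontier = []; for u in frontier: …; frontier = new_frontier'
-- (fuel decreases once per node u processed; switching to the next level costs nothing)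
def BFSouterA (m : Int) (adjList : List (Int × List Int)) (numbers : List String) :
    Nat → List Int → List Int → List Bool → List Int → List String
  | 0, _, _, _, _ => ["Neibb"]
  | f+1, [], nf, visited, parent =>
      match nf with
      | [] => ["Neibb"]
      | w :: ws => BFSouterA m adjList numbers (f+1) (w :: ws) [] visited parent
  | f+1, u :: fr, nf, visited, parent =>
      match BFSinnerA m u numbers (PySem.Dict.getD (PySem.Dict.mk adjList) u []) visited parent nf with
      | .error res => res
      | .ok (visited, parent, nf) => BFSouterA m adjList numbers f fr nf visited parent
  termination_by f fr nf _ _ => (f, nf.length)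

def BFS (n : Int) (m : Int) (adjList : List (Int × List Int)) (numbers : List String) : List String :=
  let visited := PySem.List.pySetD (List.replicate (m+2).toNat false) m true
  let parent := List.replicate (m+2).toNat (-1 : Int)
  BFSouterA m adjList numbers (m+3).toNat [m] [] visited parent

-- ===== PORT B =====
-- _rebuild: recursive forward rebuild of the answer along the parent chain (fuel = termination artifact)
def BFSwalkB (parent : PySem.Dict Int Int) (numbers : List String) : Nat → Int → List String
  | 0, curr => [PySem.List.pyGetD numbers curr ""]
  | f+1, curr =>
    let p := PySem.Dict.getD parent curr (-1)
    if p = -1 then [PySem.List.pyGetD numbers curr ""]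
    else BFSwalkB parent numbers f p ++ [PySem.List.pyGetD numbers curr ""]

-- 'for v in adjList[u]: …' of B; queue carries the not-yet-dequeued tail
def BFSinnerB (m u : Int) (numbers : List String) :
    List Int → PySem.Set Int → PySem.Dict Int Int → List Int →
    Except (List String) (PySem.Set Int × PySem.Dict Int Int × List Int)
  | [], visited, parent, queue => .ok (visited, parent, queue)
  | v :: vs, visited, parent, queue =>
    if PySem.Set.contains visited v = false then
      let visited := PySem.Set.add visited v
      let parent := PySem.Dict.insert parent v u
      let queue := queue ++ [v]
      if v = m + 1 then .error (BFSwalkB parent numbers (m+2).toNat (m+1))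
      else BFSinnerB m u numbers vs visited parent queue
    else BFSinnerB m u numbers vs visited parent queue

-- 'while head < len(queue): u = queue[head]; head += 1; …' (queue is the live part queue[head:])
def BFSouterB (m : Int) (adjList : List (Int × List Int)) (numbers : List String) :
    Nat → List Int → PySem.Set Int → PySem.Dict Int Int → List String
  | _, [], _, _ => ["Neibb"]
  | 0, _ :: _, _, _ => ["Neibb"]
  | f+1, u :: queue, visited, parent =>
      match BFSinnerB m u numbers (PySem.Dict.getD (PySem.Dict.mk adjList) u []) visited parent queue with
      | .error res => res
      | .ok (visited, parent, queue) => BFSouterB m adjList numbers f queue visited parent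

def BFS_alt (n : Int) (m : Int) (adjList : List (Int × List Int)) (numbers : List String) : List String :=
  BFSouterB m adjList numbers (m+3).toNat [m] (PySem.Set.ofList [m]) PySem.Dict.empty

-- ===== PRECONDITION & SPEC =====
-- Pre_ excludes exactly the inputs on which the traversal from m runs into a raise or a
-- negative-index wraparound of Python A: m < 0 (IndexError/wraparound on visited[m]), a reached
-- vertex without an adjacency key (KeyError), a reached neighbour outside [0, m+2) (IndexError or
-- accidental negative-index wraparound in visited[v]), and numbers shorter than m+2 while m+1 is
-- discoverable (IndexError when the path is printed).  Stated declaratively: some set S of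
-- adjacency keys contains m, holds only vertices in [0, m+2), is closed under the edges up to the
-- first m+1 of a neighbour list (A returns there, examining nothing after it), and demands numbers
-- long enough only when some S-vertex lists m+1.  (Junk entries outside S are irrelevant, admitted.)
def Pre_BFS (n : Int) (m : Int) (adjList : List (Int × List Int)) (numbers : List String) : Prop :=
  0 ≤ m ∧
  ∃ S ∈ (adjList.map Prod.fst).sublists,
    m ∈ S ∧
    (∀ v ∈ S, 0 ≤ v ∧ v < m + 2 ∧
      ∀ w ∈ (PySem.Dict.getD (PySem.Dict.mk adjList) v []).takeWhile
        (fun w => decide (w ≠ m + 1)), w ∈ S) ∧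
    ((∃ v ∈ S, m + 1 ∈ PySem.Dict.getD (PySem.Dict.mk adjList) v []) →
      (m + 2 : Int) ≤ (numbers.length : Int))
instance (n : Int) (m : Int) (adjList : List (Int × List Int)) (numbers : List String) : Decidable (Pre_BFS n m adjList numbers) := by unfold Pre_BFS; infer_instance

def pvWitness_BFS : Int × Int × (List (Int × List Int)) × List String := (0, 0, [(0, [1]), (1, [])], ["a", "b"])

def Spec_BFS (n : Int) (m : Int) (adjList : List (Int × List Int)) (numbers : List String) (out : List String) : Prop := out = BFS_alt n m adjList numbers
instance (n : Int) (m : Int) (adjList : List (Int × List Int)) (numbers : List String) (out : List String) : Decidable (Spec_BFS n m adjList numbers out) := by unfold Spec_BFS; infer_instance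

-- ===== CLAIM (what is proved, stated in full; the proofs are below) =====
def Claim_equal_BFS : Prop := ∀ (n : Int) (m : Int) (adjList : List (Int × List Int)) (numbers : List String), Dom_BFS n m adjList numbers → Pre_BFS n m adjList numbers → Spec_BFS n m adjList numbers (BFS n m adjList numbers)

-- ===== LEMMAS AND PROOFS =====

-- v is a valid vertex index of the two size-(m+2) arrays
def pvInR (m v : Int) : Prop := 0 ≤ v ∧ v < m + 2

-- the simulation relation between A's array state and B's set/dict state
def pvRel (m : Int) (visA : List Bool) (parA : List Int)
    (visB : PySem.Set Int) (parB : PySem.Dict Int Int) : Prop :=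
  visA.length = (m+2).toNat ∧ parA.length = (m+2).toNat ∧
  (∀ v, pvInR m v → PySem.List.pyGetD visA v false = PySem.Set.contains visB v) ∧
  (∀ v, pvInR m v → PySem.List.pyGetD parA v (-1) = PySem.Dict.getD parB v (-1)) ∧
  (∀ v, pvInR m v → PySem.List.pyGetD parA v (-1) ≠ -1 → pvInR m (PySem.List.pyGetD parA v (-1)))

-- the chain of parents above curr (proof-side skeleton of both walks)
def pvChain (parA : List Int) : Nat → Int → List Int
  | 0, _ => []
  | f+1, curr =>
    let p := PySem.List.pyGetD parA curr (-1)
    if p ≠ -1 then p :: pvChain parA f p else []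

theorem walkA_eq_chain (parA : List Int) (f : Nat) :
    ∀ curr path, BFSwalkA parA f curr path = path ++ pvChain parA f curr := by
  induction f with
  | zero => intro curr path; simp [BFSwalkA, pvChain]
  | succ f ih =>
    intro curr path
    simp only [BFSwalkA, pvChain]
    by_cases h : PySem.List.pyGetD parA curr (-1) ≠ -1
    · simp [h, ih]
    · simp [h]

theorem range_rev_map (g : Int → String) (path : List Int) :
    (PySem.List.pyRange ((path.length : Int) - 1) (-1) (-1)).map
      (fun i => g (PySem.List.pyGetD path i 0)) = path.reverse.map g := by
  rw [PySem.List.pyRange_neg_one]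
  have hlen : (((path.length : Int) - 1) - (-1)).toNat = path.length := by omega
  rw [hlen, List.map_map]
  apply List.ext_getElem
  · simp
  · intro k h1 h2
    simp only [List.getElem_map, List.getElem_range, Function.comp_apply, List.getElem_reverse]
    have hk : k < path.length := by simpa using h2
    have : ((path.length : Int) - 1 - k) = ((path.length - 1 - k : Nat) : Int) := by omega
    rw [this, PySem.List.pyGetD_natCast, List.getD_eq_getElem?_getD, List.getElem?_eq_getElem (by omega)]
    simp

theorem walkB_eq_chain (m : Int) (visA : List Bool) (parA : List Int)
    (visB : PySem.Set Int) (parB : PySem.Dict Int Int) (numbers : List String)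
    (hrel : pvRel m visA parA visB parB) (f : Nat) :
    ∀ curr, pvInR m curr →
      BFSwalkB parB numbers f curr =
        (pvChain parA f curr).reverse.map (fun c => PySem.List.pyGetD numbers c "") ++
          [PySem.List.pyGetD numbers curr ""] := by
  obtain ⟨-, -, -, hpar, hcl⟩ := hrel
  induction f with
  | zero => intro curr _; simp [BFSwalkB, pvChain]
  | succ f ih =>
    intro curr hc
    simp only [BFSwalkB, pvChain]
    rw [← hpar curr hc]
    by_cases h : PySem.List.pyGetD parA curr (-1) = -1
    · simp [h]
    · simp only [h, ne_eq, if_false, if_true, not_false_eq_true]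
      rw [ih _ (hcl curr hc h)]
      simp

theorem recon_eq (m : Int) (visA : List Bool) (parA : List Int)
    (visB : PySem.Set Int) (parB : PySem.Dict Int Int) (numbers : List String)
    (hm : 0 ≤ m) (hrel : pvRel m visA parA visB parB) :
    BFSreconA m parA numbers = BFSwalkB parB numbers (m+2).toNat (m+1) := by
  have hin : pvInR m (m+1) := ⟨by omega, by omega⟩
  rw [walkB_eq_chain m visA parA visB parB numbers hrel _ _ hin]
  unfold BFSreconA
  rw [walkA_eq_chain, range_rev_map (fun c => PySem.List.pyGetD numbers c "")]
  simp

theorem contains_set_add (s : PySem.Set Int) (v w : Int) :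
    PySem.Set.contains (PySem.Set.add s v) w = (PySem.Set.contains s w || decide (w = v)) := by
  simp only [PySem.Set.add, PySem.Set.contains]
  split_ifs with h
  · by_cases hw : w = v
    · subst hw; simp_all
    · simp [hw]
  · simp

theorem pyGetD_set_int (xs : List Int) (v w d x : Int) (hv : 0 ≤ v) (hw : 0 ≤ w)
    (hwl : (w : Int) < (xs.length : Int)) :
    PySem.List.pyGetD (xs.set v.toNat x) w d = if w = v then x else PySem.List.pyGetD xs w d := by
  rw [PySem.List.pyGetD_eq_getElem _ _ hw (by simpa using hwl),
    PySem.List.pyGetD_eq_getElem _ _ hw (by omega)]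
  rw [List.getElem_set]
  by_cases h : w = v
  · subst h; simp
  · have : v.toNat ≠ w.toNat := by omega
    simp [h, this]

theorem pyGetD_set_bool (xs : List Bool) (v w : Int) (d x : Bool) (hv : 0 ≤ v) (hw : 0 ≤ w)
    (hwl : (w : Int) < (xs.length : Int)) :
    PySem.List.pyGetD (xs.set v.toNat x) w d = if w = v then x else PySem.List.pyGetD xs w d := by
  rw [PySem.List.pyGetD_eq_getElem _ _ hw (by simpa using hwl),
    PySem.List.pyGetD_eq_getElem _ _ hw (by omega)]
  rw [List.getElem_set]
  by_cases h : w = v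
  · subst h; simp
  · have : v.toNat ≠ w.toNat := by omega
    simp [h, this]

theorem rel_update (m u v : Int) (visA : List Bool) (parA : List Int)
    (visB : PySem.Set Int) (parB : PySem.Dict Int Int)
    (hrel : pvRel m visA parA visB parB) (hv : pvInR m v) (hu : pvInR m u) :
    pvRel m (PySem.List.pySetD visA v true) (PySem.List.pySetD parA v u)
      (PySem.Set.add visB v) (PySem.Dict.insert parB v u) := by
  obtain ⟨hl1, hl2, hvis, hpar, hcl⟩ := hrel
  obtain ⟨hv0, hv2⟩ := hv
  rw [PySem.List.pySetD_of_nonneg _ _ hv0, PySem.List.pySetD_of_nonneg _ _ hv0]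
  refine ⟨by simpa using hl1, by simpa using hl2, ?_, ?_, ?_⟩
  · intro w hw
    obtain ⟨hw0, hw2⟩ := hw
    rw [pyGetD_set_bool visA v w false true hv0 hw0 (by rw [hl1]; omega), contains_set_add]
    by_cases h : w = v
    · simp [h]
    · simp [h, hvis w ⟨hw0, hw2⟩]
  · intro w hw
    obtain ⟨hw0, hw2⟩ := hw
    rw [pyGetD_set_int parA v w (-1) u hv0 hw0 (by rw [hl2]; omega), PySem.Dict.getD_insert]
    by_cases h : w = v
    · simp [h]
    · simp [h, hpar w ⟨hw0, hw2⟩]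
  · intro w hw
    obtain ⟨hw0, hw2⟩ := hw
    rw [pyGetD_set_int parA v w (-1) u hv0 hw0 (by rw [hl2]; omega)]
    by_cases h : w = v
    · rw [if_pos h]; intro _; exact hu
    · rw [if_neg h]; exact hcl w ⟨hw0, hw2⟩

theorem inner_sim (m u : Int) (S : List Int) (numbers : List String) (hm : 0 ≤ m)
    (hu : pvInR m u) (hSin : ∀ v ∈ S, pvInR m v) :
    ∀ (vs : List Int) (visA : List Bool) (parA : List Int)
      (visB : PySem.Set Int) (parB : PySem.Dict Int Int) (nf q : List Int),
      pvRel m visA parA visB parB →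
      PySem.List.pyGetD visA (m+1) false = false →
      (∀ w ∈ vs.takeWhile (fun w => decide (w ≠ m + 1)), w ∈ S) →
      (∃ res, BFSinnerA m u numbers vs visA parA nf = .error res ∧
              BFSinnerB m u numbers vs visB parB q = .error res) ∨
      (∃ visA' parA' visB' parB' Δ,
        BFSinnerA m u numbers vs visA parA nf = .ok (visA', parA', nf ++ Δ) ∧
        BFSinnerB m u numbers vs visB parB q = .ok (visB', parB', q ++ Δ) ∧
        pvRel m visA' parA' visB' parB' ∧
        PySem.List.pyGetD visA' (m+1) false = false ∧ (∀ x ∈ Δ, x ∈ S)) := by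
  intro vs
  induction vs with
  | nil =>
    intro visA parA visB parB nf q hrel hne _
    right
    exact ⟨visA, parA, visB, parB, [], by simp [BFSinnerA], by simp [BFSinnerB], hrel, hne,
      by simp⟩
  | cons v vs ih =>
    intro visA parA visB parB nf q hrel hne hgood
    have hin1 : pvInR m (m+1) := ⟨by omega, by omega⟩
    simp only [BFSinnerA, BFSinnerB]
    by_cases hv1 : v = m + 1
    · subst hv1
      have hBfalse : PySem.Set.contains visB (m+1) = false := (hrel.2.2.1 (m+1) hin1) ▸ hne
      rw [if_pos hne, if_pos hBfalse, if_pos rfl, if_pos rfl]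
      have hrel' := rel_update m u (m+1) visA parA visB parB hrel hin1 hu
      exact Or.inl ⟨_, rfl, by
        rw [recon_eq m (PySem.List.pySetD visA (m+1) true) (PySem.List.pySetD parA (m+1) u)
          (PySem.Set.add visB (m+1)) (PySem.Dict.insert parB (m+1) u) numbers hm hrel']⟩
    · have hpref : ∀ w ∈ (v :: vs).takeWhile (fun w => decide (w ≠ m + 1)), w ∈ S := hgood
      rw [List.takeWhile_cons, if_pos (by simp [hv1])] at hpref
      have hvS : v ∈ S := hpref v (by simp)
      have htail : ∀ w ∈ vs.takeWhile (fun w => decide (w ≠ m + 1)), w ∈ S :=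
        fun w hw => hpref w (List.mem_cons_of_mem v hw)
      have hv : pvInR m v := hSin v hvS
      have hvistest := hrel.2.2.1 v hv
      by_cases hvisited : PySem.List.pyGetD visA v false = false
      · have hBfalse : PySem.Set.contains visB v = false := hvistest ▸ hvisited
        rw [if_pos hvisited, if_pos hBfalse, if_neg hv1, if_neg hv1]
        have hrel' := rel_update m u v visA parA visB parB hrel hv hu
        have hlen : ((m+1 : Int)) < (visA.length : Int) := by
          rw [hrel.1]; omega
        have hne' : PySem.List.pyGetD (PySem.List.pySetD visA v true) (m+1) false = false := by
          rw [PySem.List.pySetD_of_nonneg _ _ hv.1,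
            pyGetD_set_bool visA v (m+1) false true hv.1 hin1.1 hlen,
            if_neg (fun h => hv1 h.symm)]
          exact hne
        rcases ih _ _ _ _ (nf ++ [v]) (q ++ [v]) hrel' hne' htail with
          ⟨res, h1, h2⟩ | ⟨vA, pA, vB, pB, Δ, h1, h2, h3, h4, h5⟩
        · exact Or.inl ⟨res, h1, h2⟩
        · refine Or.inr ⟨vA, pA, vB, pB, v :: Δ, ?_, ?_, h3, h4, ?_⟩
          · rw [h1]; simp
          · rw [h2]; simp
          · intro x hx
            rcases List.mem_cons.mp hx with h | h
            · exact h ▸ hvS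
            · exact h5 x h
      · have hBtrue : ¬ PySem.Set.contains visB v = false := hvistest ▸ hvisited
        rw [if_neg hvisited, if_neg hBtrue]
        exact ih _ _ _ _ nf q hrel hne htail

theorem outer_sim (m : Int) (adjList : List (Int × List Int)) (numbers : List String)
    (hm : 0 ≤ m) (S : List Int)
    (hS : ∀ v ∈ S, (0 ≤ v ∧ v < m + 2) ∧
      ∀ w ∈ (PySem.Dict.getD (PySem.Dict.mk adjList) v []).takeWhile
        (fun w => decide (w ≠ m + 1)), w ∈ S) (f : Nat) :
    ∀ (frontier nf : List Int) (visA : List Bool) (parA : List Int)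
      (visB : PySem.Set Int) (parB : PySem.Dict Int Int),
      pvRel m visA parA visB parB →
      PySem.List.pyGetD visA (m+1) false = false →
      (∀ x ∈ frontier, x ∈ S) → (∀ x ∈ nf, x ∈ S) →
      BFSouterA m adjList numbers f frontier nf visA parA =
        BFSouterB m adjList numbers f (frontier ++ nf) visB parB := by
  induction f with
  | zero =>
    intro frontier nf _ _ _ _ _ _ _ _
    cases frontier ++ nf with
    | nil => simp [BFSouterA, BFSouterB]
    | cons w ws => simp [BFSouterA, BFSouterB]
  | succ f ih =>
    have hcons : ∀ (u : Int) (fr nf : List Int) (visA : List Bool) (parA : List Int)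
        (visB : PySem.Set Int) (parB : PySem.Dict Int Int),
        pvRel m visA parA visB parB →
        PySem.List.pyGetD visA (m+1) false = false →
        u ∈ S → (∀ x ∈ fr, x ∈ S) → (∀ x ∈ nf, x ∈ S) →
        BFSouterA m adjList numbers (f+1) (u :: fr) nf visA parA =
          BFSouterB m adjList numbers (f+1) (u :: (fr ++ nf)) visB parB := by
      intro u fr nf visA parA visB parB hrel hne hu hfr hnf
      simp only [BFSouterA, BFSouterB]
      rcases inner_sim m u S numbers hm (hS u hu).1 (fun v hv => (hS v hv).1)
          (PySem.Dict.getD (PySem.Dict.mk adjList) u [])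
          visA parA visB parB nf (fr ++ nf) hrel hne ((hS u hu).2) with
        ⟨res, h1, h2⟩ | ⟨vA, pA, vB, pB, Δ, h1, h2, h3, h4, h5⟩
      · rw [h1, h2]
      · rw [h1, h2]
        simp only
        have : fr ++ nf ++ Δ = fr ++ (nf ++ Δ) := by simp
        rw [this]
        exact ih fr (nf ++ Δ) vA pA vB pB h3 h4 hfr
          (fun x hx => (List.mem_append.mp hx).elim (hnf x) (h5 x))
    intro frontier nf visA parA visB parB hrel hne hfr hnf
    cases frontier with
    | cons u fr =>
      exact hcons u fr nf visA parA visB parB hrel hne (hfr u (by simp))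
        (fun x hx => hfr x (by simp [hx])) hnf
    | nil =>
      cases nf with
      | nil => simp [BFSouterA, BFSouterB]
      | cons w ws =>
        show BFSouterA m adjList numbers (f+1) [] (w :: ws) visA parA = _
        rw [show BFSouterA m adjList numbers (f+1) [] (w :: ws) visA parA =
          BFSouterA m adjList numbers (f+1) (w :: ws) [] visA parA from by
            conv_lhs => rw [BFSouterA]]
        have := hcons w ws [] visA parA visB parB hrel hne (hnf w (by simp))
          (fun x hx => hnf x (by simp [hx])) (by simp)
        simpa using this

theorem rel_init (m : Int) (hm : 0 ≤ m) :
    pvRel m (PySem.List.pySetD (List.replicate (m+2).toNat false) m true)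
      (List.replicate (m+2).toNat (-1 : Int))
      (PySem.Set.ofList [m]) PySem.Dict.empty := by
  rw [PySem.List.pySetD_of_nonneg _ _ hm]
  refine ⟨by simp, by simp, ?_, ?_, ?_⟩
  · intro w hw
    obtain ⟨hw0, hw2⟩ := hw
    rw [pyGetD_set_bool (List.replicate (m+2).toNat false) m w false true hm hw0
      (by simp; omega)]
    by_cases h : w = m
    · simp [h, PySem.Set.ofList, PySem.Set.contains, PySem.Set.add, PySem.Set.empty]
    · rw [if_neg h,
        PySem.List.pyGetD_eq_getElem _ _ hw0 (by simp; omega)]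
      simp only [List.getElem_replicate]
      simp [PySem.Set.ofList, PySem.Set.contains, PySem.Set.add, PySem.Set.empty, h]
  · intro w hw
    obtain ⟨hw0, hw2⟩ := hw
    rw [PySem.List.pyGetD_eq_getElem _ _ hw0 (by simp; omega)]
    simp [PySem.Dict.getD_empty]
  · intro w hw
    obtain ⟨hw0, hw2⟩ := hw
    rw [PySem.List.pyGetD_eq_getElem _ _ hw0 (by simp; omega)]
    simp

-- ===== VERDICT (by name: the statement is the Claim_ definition above) =====
theorem BFS_spec : Claim_equal_BFS := by
  intro n m adjList numbers _ hpre
  obtain ⟨hm, S, -, hmS, hSgood, -⟩ := hpre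
  unfold Spec_BFS BFS BFS_alt
  have hne0 : PySem.List.pyGetD
      (PySem.List.pySetD (List.replicate (m+2).toNat false) m true) (m+1) false = false := by
    rw [PySem.List.pySetD_of_nonneg _ _ hm,
      pyGetD_set_bool (List.replicate (m+2).toNat false) m (m+1) false true hm (by omega)
        (by simp)]
    rw [if_neg (by omega), PySem.List.pyGetD_eq_getElem _ _ (by omega) (by simp)]
    simp
  have := outer_sim m adjList numbers hm S
    (fun v hv => ⟨⟨(hSgood v hv).1, (hSgood v hv).2.1⟩, (hSgood v hv).2.2⟩) (m+3).toNat
    [m] [] _ _ (PySem.Set.ofList [m]) PySem.Dict.empty (rel_init m hm) hne0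
    (by intro x hx; simp at hx; subst hx; exact hmS) (by simp)
  simpa using this
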